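-- pv_equiv track=rewrite | github.com/linhdvu14/cp-sols | sols/CodeForces/1607_d3/E_Robot_on_the_Board_1.py | solve
-- ===== SOURCE A (Python) =====
-- def solve(R, C, moves):
-- 	pmnr = pmnc = mnr = mxr = mnc = mxc = 0
-- 	r = c = 0
-- 	for m in moves:
-- 		if m == 'L': c -= 1
-- 		if m == 'R': c += 1
-- 		if m == 'U': r -= 1
-- 		if m == 'D': r += 1
-- 		mnr = min(mnr, r)
-- 		mxr = max(mxr, r)
-- 		mnc = min(mnc, c)
-- 		mxc = max(mxc, c)
-- 		if mxr-mnr >= R or mxc-mnc >= C: break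
-- 		pmnr, pmnc = mnr, mnc
-- 	return (abs(pmnr), abs(pmnc))
-- ===== SOURCE B (Python) =====
-- # Decoupled re-implementation: two independent per-axis passes, then a simple combine.
--
-- def _delta_row(m):
--     if m == 'U': return -1
--     if m == 'D': return 1
--     return 0
--
-- def _delta_col(m):
--     if m == 'L': return -1
--     if m == 'R': return 1
--     return 0
--
-- def _axis_states(moves, delta, bound):
--     # For one axis: after each move, (span still < bound, running minimum position).
--     lo = hi = x = 0
--     out = []
--     for m in moves:
--         x += delta(m)
--         if x < lo: lo = x
--         if x > hi: hi = x
--         out.append((hi - lo < bound, lo))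
--     return out
--
-- def solve(R, C, moves):
--     rstates = _axis_states(moves, _delta_row, R)
--     cstates = _axis_states(moves, _delta_col, C)
--     ar = ac = 0
--     for (okr, lor), (okc, loc) in zip(rstates, cstates):
--         if not (okr and okc):
--             break
--         ar, ac = lor, loc
--     return (-ar, -ac)
-- ===== Notes on version B (the rewrite author's own statement) =====
-- stated objective: alternative
-- what changed: A's single coupled scan maintaining four running bounds with an early break is replaced by two independent per-axis passes (each computing, per step, whether that axis's span is still within bound and its running minimum) followed by a simple zip-combine that walks until either axis breaks.
import Mathlib
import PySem

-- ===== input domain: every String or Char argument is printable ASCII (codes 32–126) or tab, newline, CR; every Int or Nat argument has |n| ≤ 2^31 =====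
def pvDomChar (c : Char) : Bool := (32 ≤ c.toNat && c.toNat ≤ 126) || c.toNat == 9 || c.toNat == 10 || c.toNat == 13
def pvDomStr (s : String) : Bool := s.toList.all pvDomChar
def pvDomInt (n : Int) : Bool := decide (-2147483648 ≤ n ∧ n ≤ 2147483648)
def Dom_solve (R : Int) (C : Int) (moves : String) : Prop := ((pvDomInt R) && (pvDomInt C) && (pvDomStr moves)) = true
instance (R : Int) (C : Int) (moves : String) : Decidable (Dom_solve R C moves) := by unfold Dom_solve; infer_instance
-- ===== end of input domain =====

-- B replaces A's single coupled running-bounds scan by two independent per-axis passes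
-- plus a zip-combine; objective: alternative decomposition (same asymptotic cost).

-- ===== PORT A =====
-- literal transliteration of A's loop: eight running variables, break on span overflow
def solveAGo (R : Int) (C : Int) : List Char → Int → Int → Int → Int → Int → Int → Int → Int → Int × Int
  | [], pmnr, pmnc, _, _, _, _, _, _ => (|pmnr|, |pmnc|)
  | m :: ms, pmnr, pmnc, mnr, mxr, mnc, mxc, r, c =>
    let c1 := if m = 'L' then c - 1 else c
    let c2 := if m = 'R' then c1 + 1 else c1
    let r1 := if m = 'U' then r - 1 else r
    let r2 := if m = 'D' then r1 + 1 else r1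
    let mnr' := min mnr r2
    let mxr' := max mxr r2
    let mnc' := min mnc c2
    let mxc' := max mxc c2
    if mxr' - mnr' ≥ R ∨ mxc' - mnc' ≥ C then (|pmnr|, |pmnc|)
    else solveAGo R C ms mnr' mnc' mnr' mxr' mnc' mxc' r2 c2

def solve (R : Int) (C : Int) (moves : String) : Int × Int :=
  solveAGo R C moves.toList 0 0 0 0 0 0 0 0

-- ===== PORT B =====
def dRow (m : Char) : Int := if m = 'U' then -1 else if m = 'D' then 1 else 0

def dCol (m : Char) : Int := if m = 'L' then -1 else if m = 'R' then 1 else 0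

-- per-axis pass: for each step, (span still < bound, running minimum)
def axisGo (d : Char → Int) (bound : Int) : List Char → Int → Int → Int → List (Bool × Int)
  | [], _, _, _ => []
  | m :: ms, lo, hi, x =>
    let x' := x + d m
    let lo' := if x' < lo then x' else lo
    let hi' := if x' > hi then x' else hi
    (decide (hi' - lo' < bound), lo') :: axisGo d bound ms lo' hi' x'

-- combine: walk zipped per-axis states until either axis breaks
def combineGo : List ((Bool × Int) × (Bool × Int)) → Int → Int → Int × Int
  | [], ar, ac => (ar, ac)
  | ((okr, lor), (okc, loc)) :: rest, ar, ac =>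
    if okr && okc then combineGo rest lor loc else (ar, ac)

def solve_alt (R : Int) (C : Int) (moves : String) : Int × Int :=
  let rstates := axisGo dRow R moves.toList 0 0 0
  let cstates := axisGo dCol C moves.toList 0 0 0
  let p := combineGo (rstates.zip cstates) 0 0
  (-p.1, -p.2)

-- ===== PRECONDITION & SPEC =====
def Spec_solve (R : Int) (C : Int) (moves : String) (out : Int × Int) : Prop := out = solve_alt R C moves
instance (R : Int) (C : Int) (moves : String) (out : Int × Int) : Decidable (Spec_solve R C moves out) := by unfold Spec_solve; infer_instance

-- ===== CLAIM (what is proved, stated in full; the proofs are below) =====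
def Claim_equal_solve : Prop := ∀ (R : Int) (C : Int) (moves : String), Dom_solve R C moves → Spec_solve R C moves (solve R C moves)

-- ===== LEMMAS AND PROOFS =====

lemma step_col (m : Char) (c : Int) :
    (if m = 'R' then (if m = 'L' then c - 1 else c) + 1 else (if m = 'L' then c - 1 else c))
      = c + dCol m := by
  unfold dCol; split_ifs <;> simp_all <;> ring

lemma step_row (m : Char) (r : Int) :
    (if m = 'D' then (if m = 'U' then r - 1 else r) + 1 else (if m = 'U' then r - 1 else r))
      = r + dRow m := by
  unfold dRow; split_ifs <;> simp_all <;> ring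

lemma min_if (lo x : Int) : (if x < lo then x else lo) = min lo x := by
  rw [Int.min_def]; split_ifs <;> omega

lemma max_if (hi x : Int) : (if x > hi then x else hi) = max hi x := by
  rw [Int.max_def]; split_ifs <;> omega

lemma mainGo (R C : Int) (ms : List Char) :
    ∀ (pmnr pmnc mnr mxr mnc mxc r c : Int),
      pmnr ≤ 0 → pmnc ≤ 0 → mnr ≤ 0 → mnc ≤ 0 →
      solveAGo R C ms pmnr pmnc mnr mxr mnc mxc r c =
        ((fun p => (-p.1, -p.2))
          (combineGo ((axisGo dRow R ms mnr mxr r).zip (axisGo dCol C ms mnc mxc c)) pmnr pmnc)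
          : Int × Int) := by
  induction ms with
  | nil =>
    intro pmnr pmnc mnr mxr mnc mxc r c h1 h2 h3 h4
    simp only [solveAGo, axisGo, List.zip_nil_left, combineGo]
    have : |pmnr| = -pmnr := abs_of_nonpos h1
    have : |pmnc| = -pmnc := abs_of_nonpos h2
    simp_all
  | cons m ms ih =>
    intro pmnr pmnc mnr mxr mnc mxc r c h1 h2 h3 h4
    simp only [solveAGo, axisGo, List.zip_cons_cons, combineGo,
      step_col, step_row, min_if, max_if]
    by_cases h : max mxr (r + dRow m) - min mnr (r + dRow m) ≥ R ∨
        max mxc (c + dCol m) - min mnc (c + dCol m) ≥ C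
    · have hb : (decide (max mxr (r + dRow m) - min mnr (r + dRow m) < R) &&
          decide (max mxc (c + dCol m) - min mnc (c + dCol m) < C)) = false := by
        rcases h with h | h <;> simp [decide_eq_false, not_lt.mpr h]
      rw [if_pos h, hb]
      simp only [Bool.false_eq_true, if_neg (by simp : ¬ False)]
      have e1 : |pmnr| = -pmnr := abs_of_nonpos h1
      have e2 : |pmnc| = -pmnc := abs_of_nonpos h2
      simp [e1, e2]
    · have hb : (decide (max mxr (r + dRow m) - min mnr (r + dRow m) < R) &&
          decide (max mxc (c + dCol m) - min mnc (c + dCol m) < C)) = true := by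
        push Not at h
        simp [h.1, h.2]
      rw [if_neg h, hb]
      exact ih _ _ _ _ _ _ _ _
        (le_trans (min_le_left _ _) h3) (le_trans (min_le_left _ _) h4)
        (le_trans (min_le_left _ _) h3) (le_trans (min_le_left _ _) h4)

-- ===== VERDICT (by name: the statement is the Claim_ definition above) =====
theorem solve_spec : Claim_equal_solve := by
  intro R C moves _
  unfold Spec_solve solve solve_alt
  exact mainGo R C moves.toList 0 0 0 0 0 0 0 0 le_rfl le_rfl le_rfl le_rfl
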